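-- pv_equiv track=rewrite | github.com/Jayallen77/LEDMatrix | src/web_config_utils.py | build_secrets_fragment_from_form
-- ===== SOURCE A (Python) =====
-- from collections.abc import Mapping, MutableMapping
-- from typing import Any, Optional
--
-- DEFAULT_SPOTIFY_REDIRECT_URI = "http://127.0.0.1:8888/callback"
--
-- def build_secrets_fragment_from_form(form_data: Mapping[str, Any]) -> dict:
--     """Build a secrets fragment from the v1/v2 form field names."""
--     fragment = {}
--
--     if "weather_api_key" in form_data:
--         fragment["weather"] = {
--             "api_key": form_data.get("weather_api_key", "")
--         }
--
--     if "youtube_api_key" in form_data or "youtube_channel_id" in form_data: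
--         youtube_fragment = {}
--         if "youtube_api_key" in form_data:
--             youtube_fragment["api_key"] = form_data.get("youtube_api_key", "")
--         if "youtube_channel_id" in form_data:
--             youtube_fragment["channel_id"] = form_data.get("youtube_channel_id", "")
--         fragment["youtube"] = youtube_fragment
--
--     spotify_fields = {"spotify_client_id", "spotify_client_secret", "spotify_redirect_uri"}
--     if any(field in form_data for field in spotify_fields):
--         music_fragment = {}
--         if "spotify_client_id" in form_data:
--             music_fragment["SPOTIFY_CLIENT_ID"] = form_data.get("spotify_client_id", "")
--         if "spotify_client_secret" in form_data:
--             music_fragment["SPOTIFY_CLIENT_SECRET"] = form_data.get("spotify_client_secret", "")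
--         music_fragment["SPOTIFY_REDIRECT_URI"] = form_data.get(
--             "spotify_redirect_uri",
--             DEFAULT_SPOTIFY_REDIRECT_URI,
--         )
--         fragment["music"] = music_fragment
--
--     return fragment
-- ===== SOURCE B (Python) =====
-- DEFAULT_SPOTIFY_REDIRECT_URI = "http://127.0.0.1:8888/callback"
--
-- # Declarative spec: (output key, [(form_key, out_key, always_include, default)])
-- _GROUPS = [
--     ("weather", [("weather_api_key", "api_key", False, "")]),
--     ("youtube", [("youtube_api_key", "api_key", False, ""),
--                  ("youtube_channel_id", "channel_id", False, "")]),
--     ("music", [("spotify_client_id", "SPOTIFY_CLIENT_ID", False, ""),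
--                ("spotify_client_secret", "SPOTIFY_CLIENT_SECRET", False, ""),
--                ("spotify_redirect_uri", "SPOTIFY_REDIRECT_URI", True,
--                 DEFAULT_SPOTIFY_REDIRECT_URI)]),
-- ]
--
-- def build_secrets_fragment_from_form(form_data):
--     """Build a secrets fragment from the v1/v2 form field names."""
--     fragment = {}
--     for out_key, fields in _GROUPS:
--         if any(form_key in form_data for form_key, _, _, _ in fields):
--             fragment[out_key] = {
--                 name: form_data.get(form_key, default)
--                 for form_key, name, always, default in fields
--                 if always or form_key in form_data
--             }
--     return fragment
-- ===== Notes on version B (the rewrite author's own statement) =====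
-- stated objective: simpler
-- what changed: Replaced the three hand-written per-service if-blocks by a declarative field-spec table (output key, form key, out key, always-include flag, default) driven by one generic loop; spotify's always-included redirect_uri is just a table entry.
import Mathlib
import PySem

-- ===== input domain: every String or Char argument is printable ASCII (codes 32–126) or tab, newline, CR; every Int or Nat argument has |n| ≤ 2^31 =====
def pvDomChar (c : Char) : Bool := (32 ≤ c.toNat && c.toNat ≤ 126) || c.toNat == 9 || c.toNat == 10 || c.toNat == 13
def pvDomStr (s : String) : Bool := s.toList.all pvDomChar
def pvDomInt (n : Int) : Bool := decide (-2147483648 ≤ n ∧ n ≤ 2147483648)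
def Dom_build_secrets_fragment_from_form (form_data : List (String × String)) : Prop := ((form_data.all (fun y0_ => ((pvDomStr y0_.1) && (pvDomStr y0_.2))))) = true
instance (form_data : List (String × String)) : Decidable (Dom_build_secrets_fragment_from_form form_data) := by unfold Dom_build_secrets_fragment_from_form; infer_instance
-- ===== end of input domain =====

-- B replaces the three hand-written per-service if-blocks by a declarative field-spec table driven by one generic loop (objective: simpler).

-- ===== PORT A =====
-- assoc-list membership / get with default (Python dict 'in' / '.get')
def pvHasKey (fd : List (String × String)) (k : String) : Bool := fd.any (fun p => p.1 == k)
def pvGetD (fd : List (String × String)) (k d : String) : String :=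
  match fd.find? (fun p => p.1 == k) with
  | some p => p.2
  | none => d

def DEFAULT_SPOTIFY_REDIRECT_URI : String := "http://127.0.0.1:8888/callback"

def build_secrets_fragment_from_form (form_data : List (String × String)) : List (String × List (String × String)) :=
  let fragment : List (String × List (String × String)) := []
  let fragment :=
    if pvHasKey form_data "weather_api_key" then
      fragment ++ [("weather", [("api_key", pvGetD form_data "weather_api_key" "")])]
    else fragment
  let fragment :=
    if pvHasKey form_data "youtube_api_key" || pvHasKey form_data "youtube_channel_id" then
      let yf : List (String × String) := []
      let yf := if pvHasKey form_data "youtube_api_key" then yf ++ [("api_key", pvGetD form_data "youtube_api_key" "")] else yf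
      let yf := if pvHasKey form_data "youtube_channel_id" then yf ++ [("channel_id", pvGetD form_data "youtube_channel_id" "")] else yf
      fragment ++ [("youtube", yf)]
    else fragment
  let fragment :=
    if pvHasKey form_data "spotify_client_id" || pvHasKey form_data "spotify_client_secret" || pvHasKey form_data "spotify_redirect_uri" then
      let mf : List (String × String) := []
      let mf := if pvHasKey form_data "spotify_client_id" then mf ++ [("SPOTIFY_CLIENT_ID", pvGetD form_data "spotify_client_id" "")] else mf
      let mf := if pvHasKey form_data "spotify_client_secret" then mf ++ [("SPOTIFY_CLIENT_SECRET", pvGetD form_data "spotify_client_secret" "")] else mf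
      let mf := mf ++ [("SPOTIFY_REDIRECT_URI", pvGetD form_data "spotify_redirect_uri" DEFAULT_SPOTIFY_REDIRECT_URI)]
      fragment ++ [("music", mf)]
    else fragment
  fragment

-- ===== PORT B =====
-- declarative spec: (output key, [(form_key, out_key, always_include, default)])
def pvGroups : List (String × List (String × String × Bool × String)) :=
  [("weather", [("weather_api_key", "api_key", false, "")]),
   ("youtube", [("youtube_api_key", "api_key", false, ""),
                ("youtube_channel_id", "channel_id", false, "")]),
   ("music", [("spotify_client_id", "SPOTIFY_CLIENT_ID", false, ""),
              ("spotify_client_secret", "SPOTIFY_CLIENT_SECRET", false, ""),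
              ("spotify_redirect_uri", "SPOTIFY_REDIRECT_URI", true,
               DEFAULT_SPOTIFY_REDIRECT_URI)])]

def build_secrets_fragment_from_form_alt (form_data : List (String × String)) : List (String × List (String × String)) :=
  pvGroups.foldl (fun fragment g =>
    if g.2.any (fun f => pvHasKey form_data f.1) then
      fragment ++ [(g.1,
        (g.2.filter (fun f => f.2.2.1 || pvHasKey form_data f.1)).map
          (fun f => (f.2.1, pvGetD form_data f.1 f.2.2.2)))]
    else fragment) []

-- ===== PRECONDITION & SPEC =====
def Spec_build_secrets_fragment_from_form (form_data : List (String × String)) (out : List (String × List (String × String))) : Prop := out = build_secrets_fragment_from_form_alt form_data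
instance (form_data : List (String × String)) (out : List (String × List (String × String))) : Decidable (Spec_build_secrets_fragment_from_form form_data out) := by unfold Spec_build_secrets_fragment_from_form; infer_instance

-- ===== CLAIM (what is proved, stated in full; the proofs are below) =====
def Claim_equal_build_secrets_fragment_from_form : Prop := ∀ (form_data : List (String × String)), Dom_build_secrets_fragment_from_form form_data → Spec_build_secrets_fragment_from_form form_data (build_secrets_fragment_from_form form_data)

-- ===== LEMMAS AND PROOFS =====

-- ===== VERDICT (by name: the statement is the Claim_ definition above) =====
theorem build_secrets_fragment_from_form_spec : Claim_equal_build_secrets_fragment_from_form := by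
  intro fd _
  unfold Spec_build_secrets_fragment_from_form build_secrets_fragment_from_form
    build_secrets_fragment_from_form_alt pvGroups
  cases h1 : pvHasKey fd "weather_api_key" <;>
  cases h2 : pvHasKey fd "youtube_api_key" <;>
  cases h3 : pvHasKey fd "youtube_channel_id" <;>
  cases h4 : pvHasKey fd "spotify_client_id" <;>
  cases h5 : pvHasKey fd "spotify_client_secret" <;>
  cases h6 : pvHasKey fd "spotify_redirect_uri" <;>
    simp [h1, h2, h3, h4, h5, h6, List.foldl, List.any, List.filter, List.map]
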